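-- pv_equiv track=rewrite | github.com/NCCMNT/Text-Algorithms | lab4/two_dimensional_search.py | find_pattern_in_column
-- ===== SOURCE A (Python) =====
-- def find_pattern_in_column(text_column: str, pattern_columns: list[str]) -> list[tuple[int, int]]:
--     """
--     Wyszukuje wszystkie kolumny wzorca w kolumnie tekstu.
--
--     Args:
--         text_column: Kolumna tekstu
--         pattern_columns: Lista kolumn wzorca
--
--     Returns:
--         Lista krotek (pozycja, indeks kolumny), gdzie znaleziono kolumnę wzorca
--     """
--     # TODO: Zaimplementuj wyszukiwanie kolumn wzorca w kolumnie tekstu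
--     # TODO: Dla każdej kolumny wzorca, przeszukaj kolumnę tekstu
--     # TODO: Zwróć listę krotek (pozycja, indeks kolumny) dla znalezionych dopasowań
--     n = len(text_column)
--     if n == 0 or len(pattern_columns) == 0: return []
--     results = []
--
--     for j, pcol in enumerate(pattern_columns):
--         m = len(pcol)
--         if m > n: continue
--         for i in range(n - m + 1):
--             if pcol == text_column[i:i+m]:
--                 results.append((i, j))
--
--     return results
-- ===== SOURCE B (Python) =====
-- def _build_table(text_column: str, m: int) -> dict[str, list[int]]:
--     """Index of the text column: every length-m substring -> its ascending start positions."""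
--     table = {}
--     for i in range(len(text_column) - m + 1):
--         table.setdefault(text_column[i:i+m], []).append(i)
--     return table
--
--
-- def find_pattern_in_column(text_column: str, pattern_columns: list[str]) -> list[tuple[int, int]]:
--     """Two staged passes: first build, per distinct pattern length, a hash index of all
--     text substrings of that length; then answer every pattern by one dictionary lookup."""
--     if not text_column or not pattern_columns:
--         return []
--     n = len(text_column)
--     index = {}
--     for pcol in pattern_columns:
--         m = len(pcol)
--         if m <= n and m not in index:
--             index[m] = _build_table(text_column, m)
--     results = []
--     for j, pcol in enumerate(pattern_columns):
--         table = index.get(len(pcol))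
--         if table is not None:
--             for i in table.get(pcol, []):
--                 results.append((i, j))
--     return results
-- ===== Notes on version B (the rewrite author's own statement) =====
-- stated objective: faster
-- what changed: B replaces A's per-pattern scan of every start position with a two-stage hash index: one pass per DISTINCT pattern length builds a dict mapping each text substring of that length to its ascending positions, then every pattern is answered by a single dictionary lookup, so the inner scan over the text disappears for repeated pattern lengths.
import Mathlib
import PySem

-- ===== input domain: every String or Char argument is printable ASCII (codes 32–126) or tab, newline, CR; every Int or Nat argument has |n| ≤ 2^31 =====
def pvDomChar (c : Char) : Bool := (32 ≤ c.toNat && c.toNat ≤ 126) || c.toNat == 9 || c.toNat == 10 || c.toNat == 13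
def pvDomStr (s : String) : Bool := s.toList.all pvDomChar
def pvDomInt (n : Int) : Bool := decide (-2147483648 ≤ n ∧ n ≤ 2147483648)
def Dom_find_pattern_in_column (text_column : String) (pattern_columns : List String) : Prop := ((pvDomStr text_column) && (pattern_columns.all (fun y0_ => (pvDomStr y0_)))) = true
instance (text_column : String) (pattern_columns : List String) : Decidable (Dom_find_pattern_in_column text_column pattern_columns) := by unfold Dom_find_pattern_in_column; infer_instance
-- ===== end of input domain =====

-- B answers every pattern by a dictionary lookup in a hash index of the text's substrings,
-- built once per distinct pattern length, instead of A's per-pattern scan; objective: faster.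
-- ===== PORT A =====
def find_pattern_in_column (text_column : String) (pattern_columns : List String) : List (Int × Int) :=
  if PySem.Chars.len text_column.toList = 0 ∨ pattern_columns.length = 0 then []
  else
    (PySem.List.enumerate pattern_columns).foldl
      (fun results jp =>
        if PySem.Chars.len jp.2.toList > PySem.Chars.len text_column.toList then results
        else
          (PySem.List.pyRange 0
              (PySem.Chars.len text_column.toList - PySem.Chars.len jp.2.toList + 1)).foldl
            (fun results i =>
              -- string equality 'pcol == text_column[i:i+m]' ported on the char lists
              if jp.2.toList = PySem.Chars.slice text_column.toList (some i)
                  (some (i + PySem.Chars.len jp.2.toList)) then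
                results ++ [(i, jp.1)]
              else results)
            results)
      []

-- ===== PORT B =====
-- Source B's _build_table: every length-m substring of t -> its ascending start positions
-- ('table.setdefault(key, []).append(i)' is exactly Dict.modify key [] (· ++ [i]))
def pvBuildTable (t : List Char) (m : Int) : PySem.Dict (List Char) (List Int) :=
  (PySem.List.pyRange 0 (PySem.Chars.len t - m + 1)).foldl
    (fun table i =>
      table.modify (PySem.Chars.slice t (some i) (some (i + m))) [] (· ++ [i]))
    PySem.Dict.empty

def find_pattern_in_column_alt (text_column : String) (pattern_columns : List String) : List (Int × Int) :=
  if text_column.toList = [] ∨ pattern_columns = [] then []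
  else
    let n : Int := PySem.Chars.len text_column.toList
    -- first pass: index[m] = table of length-m substrings, once per distinct length m ≤ n
    let index : PySem.Dict Int (PySem.Dict (List Char) (List Int)) :=
      pattern_columns.foldl
        (fun index pcol =>
          if PySem.Chars.len pcol.toList ≤ n ∧ ¬ index.contains (PySem.Chars.len pcol.toList) = true
          then index.insert (PySem.Chars.len pcol.toList)
                 (pvBuildTable text_column.toList (PySem.Chars.len pcol.toList))
          else index)
        PySem.Dict.empty
    -- second pass: one lookup per pattern ('index.get(len(pcol))', then 'table.get(pcol, [])')
    (PySem.List.enumerate pattern_columns).foldl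
      (fun results jp =>
        match index.get? (PySem.Chars.len jp.2.toList) with
        | none => results
        | some table => results ++ (table.getD jp.2.toList []).map (fun i => (i, jp.1)))
      []

-- ===== PRECONDITION & SPEC =====
def Spec_find_pattern_in_column (text_column : String) (pattern_columns : List String) (out : List (Int × Int)) : Prop := out = find_pattern_in_column_alt text_column pattern_columns
instance (text_column : String) (pattern_columns : List String) (out : List (Int × Int)) : Decidable (Spec_find_pattern_in_column text_column pattern_columns out) := by unfold Spec_find_pattern_in_column; infer_instance

-- ===== CLAIM (what is proved, stated in full; the proofs are below) =====
def Claim_equal_find_pattern_in_column : Prop := ∀ (text_column : String) (pattern_columns : List String), Dom_find_pattern_in_column text_column pattern_columns → Spec_find_pattern_in_column text_column pattern_columns (find_pattern_in_column text_column pattern_columns)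

-- ===== LEMMAS AND PROOFS =====

-- the index-building step of B, named for the proofs
def pvIStep (t : List Char) (idx : PySem.Dict Int (PySem.Dict (List Char) (List Int)))
    (pcol : String) : PySem.Dict Int (PySem.Dict (List Char) (List Int)) :=
  if PySem.Chars.len pcol.toList ≤ PySem.Chars.len t ∧
      ¬ idx.contains (PySem.Chars.len pcol.toList) = true
  then idx.insert (PySem.Chars.len pcol.toList) (pvBuildTable t (PySem.Chars.len pcol.toList))
  else idx

-- every value stored in the index is the right table, at a key ≤ len t
def pvGoodIdx (t : List Char) (idx : PySem.Dict Int (PySem.Dict (List Char) (List Int))) : Prop :=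
  ∀ m v, idx.get? m = some v → m ≤ PySem.Chars.len t ∧ v = pvBuildTable t m

theorem pvGoodIdx_step (t : List Char) (idx) (pcol : String) (h : pvGoodIdx t idx) :
    pvGoodIdx t (pvIStep t idx pcol) := by
  intro m v
  unfold pvIStep
  split_ifs with hc
  · by_cases hm : m = PySem.Chars.len pcol.toList
    · subst hm
      rw [PySem.Dict.get?_insert_self]
      rintro ⟨rfl⟩
      exact ⟨hc.1, rfl⟩
    · rw [PySem.Dict.get?_insert_of_ne _ _ hm]
      exact h m v
  · exact h m v

theorem pvGoodIdx_foldl (t : List Char) (ps : List String) (idx) (h : pvGoodIdx t idx) :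
    pvGoodIdx t (ps.foldl (pvIStep t) idx) := by
  induction ps generalizing idx with
  | nil => exact h
  | cons q ps ih => exact ih _ (pvGoodIdx_step t idx q h)

theorem pvIdx_keep (t : List Char) (ps : List String) (idx) (m : Int)
    (h : idx.get? m ≠ none) : (ps.foldl (pvIStep t) idx).get? m ≠ none := by
  induction ps generalizing idx with
  | nil => exact h
  | cons q ps ih =>
    rw [List.foldl_cons]
    apply ih
    unfold pvIStep
    split_ifs with hc
    · by_cases hm : m = PySem.Chars.len q.toList
      · subst hm; rw [PySem.Dict.get?_insert_self]; simp
      · rw [PySem.Dict.get?_insert_of_ne _ _ hm]; exact h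
    · exact h

theorem pvIdx_cover (t : List Char) (ps : List String) (idx) (p : String) (hp : p ∈ ps)
    (hle : PySem.Chars.len p.toList ≤ PySem.Chars.len t) :
    (ps.foldl (pvIStep t) idx).get? (PySem.Chars.len p.toList) ≠ none := by
  induction ps generalizing idx with
  | nil => cases hp
  | cons q ps ih =>
    rcases List.mem_cons.mp hp with rfl | hp'
    · rw [List.foldl_cons]
      apply pvIdx_keep
      unfold pvIStep
      split_ifs with hc
      · rw [PySem.Dict.get?_insert_self]; simp
      · push Not at hc
        have hcont := hc hle
        intro hnone
        rw [PySem.Dict.get?_eq_none_iff_contains] at hnone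
        simp only [PySem.Chars.len_eq] at hnone hcont
        rw [hnone] at hcont
        exact Bool.false_ne_true hcont
    · rw [List.foldl_cons]; exact ih _ hp'

-- the table built for length m, looked up at a pattern of that length, is exactly the
-- positions where the slice equals the pattern (in range order)
theorem pvBuildTable_getD (t p : List Char) (m : Int) :
    (pvBuildTable t m).getD p [] =
      (PySem.List.pyRange 0 (PySem.Chars.len t - m + 1)).filter
        (fun i => PySem.Chars.slice t (some i) (some (i + m)) == p) := by
  unfold pvBuildTable
  have h1 : (PySem.List.pyRange 0 (PySem.Chars.len t - m + 1)).foldl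
      (fun (table : PySem.Dict (List Char) (List Int)) (i : Int) =>
        table.modify (PySem.Chars.slice t (some i) (some (i + m))) [] (· ++ [i]))
      PySem.Dict.empty =
    ((PySem.List.pyRange 0 (PySem.Chars.len t - m + 1)).map
        (fun i : Int => (PySem.Chars.slice t (some i) (some (i + m)), i))).foldl
      (fun (d : PySem.Dict (List Char) (List Int)) (q : List Char × Int) =>
        d.modify q.1 [] (· ++ [q.2]))
      PySem.Dict.empty := by
    rw [List.foldl_map]
  rw [h1, PySem.Dict.getD_foldl_modify_append, PySem.Dict.getD_empty, List.filter_map,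
    List.map_map]
  simp [Function.comp_def]

-- the two per-pattern bodies agree (for patterns of the input list)
theorem pv_inner_eq (t p : List Char) (res : List (Int × Int)) (j : Int)
    (idx : PySem.Dict Int (PySem.Dict (List Char) (List Int)))
    (hgood : pvGoodIdx t idx)
    (hcov : PySem.Chars.len p ≤ PySem.Chars.len t → idx.get? (PySem.Chars.len p) ≠ none) :
    (if PySem.Chars.len p > PySem.Chars.len t then res
     else (PySem.List.pyRange 0 (PySem.Chars.len t - PySem.Chars.len p + 1)).foldl
        (fun results i =>
          if p = PySem.Chars.slice t (some i) (some (i + PySem.Chars.len p)) then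
            results ++ [(i, j)]
          else results) res) =
    (match idx.get? (PySem.Chars.len p) with
     | none => res
     | some table => res ++ (table.getD p []).map (fun i => (i, j))) := by
  by_cases hm : PySem.Chars.len p > PySem.Chars.len t
  · rw [if_pos hm]
    rcases hn : idx.get? (PySem.Chars.len p) with _ | v
    · rfl
    · exact absurd (hgood _ _ hn).1 (by omega)
  · rw [if_neg hm]
    have hle : PySem.Chars.len p ≤ PySem.Chars.len t := by omega
    rcases hn : idx.get? (PySem.Chars.len p) with _ | v
    · exact absurd hn (hcov hle)
    · have hv : v = pvBuildTable t (PySem.Chars.len p) := (hgood _ _ hn).2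
      subst hv
      show _ = res ++ ((pvBuildTable t (PySem.Chars.len p)).getD p []).map (fun i => (i, j))
      have hfun : (fun (results : List (Int × Int)) (i : Int) =>
          if p = PySem.Chars.slice t (some i) (some (i + PySem.Chars.len p)) then
            results ++ [(i, j)] else results) =
        (fun results i =>
          if (fun i => PySem.Chars.slice t (some i) (some (i + PySem.Chars.len p)) == p) i
          then results ++ [((fun (i : Int) => ((i, j) : Int × Int)) i)] else results) := by
        funext results i
        simp only [beq_iff_eq]
        rcases eq_or_ne p (PySem.Chars.slice t (some i) (some (i + PySem.Chars.len p))) with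
          h | h
        · rw [if_pos h, if_pos h.symm]
        · rw [if_neg h, if_neg (Ne.symm h)]
      rw [hfun, PySem.List.foldl_append_if, pvBuildTable_getD]

-- ===== VERDICT (by name: the statement is the Claim_ definition above) =====
theorem find_pattern_in_column_spec : Claim_equal_find_pattern_in_column := by
  intro text_column pattern_columns _
  unfold Spec_find_pattern_in_column find_pattern_in_column find_pattern_in_column_alt
  by_cases hg : text_column.toList = [] ∨ pattern_columns = []
  · rw [if_pos, if_pos hg]
    rcases hg with h | h
    · exact Or.inl (by simp [PySem.Chars.len_eq, h])
    · exact Or.inr (by simp [h])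
  · rw [if_neg, if_neg hg]
    · apply PySem.List.foldl_congr_mem
      intro acc jp hjp
      have hmem : jp.2 ∈ pattern_columns := by
        have := PySem.List.map_snd_enumerate pattern_columns 0
        exact this ▸ List.mem_map_of_mem hjp
      exact pv_inner_eq text_column.toList jp.2.toList acc jp.1 _
        (pvGoodIdx_foldl _ _ _ (fun m v h => by
          rw [PySem.Dict.get?_empty] at h; cases h))
        (fun hle => pvIdx_cover _ _ _ _ hmem hle)
    · push Not at hg
      simp only [not_or]
      refine ⟨?_, ?_⟩
      · simp only [PySem.Chars.len_eq]
        intro h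
        exact hg.1 (List.length_eq_zero_iff.mp (by exact_mod_cast h))
      · intro h
        exact hg.2 (List.length_eq_zero_iff.mp h)
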